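-- pv_equiv track=rewrite | github.com/MrBrantCode/unitest_baseline | mut_generate/mist_train_cf/cf_91231/solution.py | sort_unique_values
-- ===== SOURCE A (Python) =====
-- def sort_unique_values(dataset):
--     # Count the frequency of each unique value
--     frequency_dict = {}
--     for item in dataset:
--         value = item[0]
--         if value in frequency_dict:
--             frequency_dict[value] += 1
--         else:
--             frequency_dict[value] = 1
--
--     # Sort the keys of the frequency dictionary based on their values
--     sorted_keys = sorted(frequency_dict.keys(), key=lambda k: (-frequency_dict[k], k))
--
--     # Create a list of unique values in descending order based on frequency
--     result = []
--     for key in sorted_keys: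
--         result.append(key)
--
--     return result
-- ===== SOURCE B (Python) =====
-- def sort_unique_values(dataset):
--     # Count frequency of each first element.
--     counts = {}
--     for item in dataset:
--         v = item[0]
--         counts[v] = counts.get(v, 0) + 1
--     # Walk the distinct frequencies from highest to lowest; within each
--     # frequency bucket emit the values in ascending order.
--     result = []
--     for c in sorted(set(counts.values()), reverse=True):
--         result.extend(sorted(v for v in counts if counts[v] == c))
--     return result
-- ===== Notes on version B (the rewrite author's own statement) =====
-- stated objective: alternative
-- what changed: Replaces the single composite-key sort sorted(keys, key=(-freq,k)) by a frequency-bucket traversal: the distinct frequencies are visited from highest to lowest and each bucket's values are sorted ascending and concatenated.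
import Mathlib
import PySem

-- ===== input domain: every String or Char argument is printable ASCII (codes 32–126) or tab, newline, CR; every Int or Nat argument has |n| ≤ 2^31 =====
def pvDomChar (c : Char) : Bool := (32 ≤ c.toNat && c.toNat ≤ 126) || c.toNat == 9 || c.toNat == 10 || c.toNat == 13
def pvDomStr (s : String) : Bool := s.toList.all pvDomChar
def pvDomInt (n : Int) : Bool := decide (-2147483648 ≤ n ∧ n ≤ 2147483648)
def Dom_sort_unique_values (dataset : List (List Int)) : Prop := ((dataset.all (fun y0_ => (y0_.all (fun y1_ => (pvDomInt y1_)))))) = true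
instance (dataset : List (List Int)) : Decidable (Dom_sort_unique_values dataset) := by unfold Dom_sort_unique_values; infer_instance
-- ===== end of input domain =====

-- B replaces A's single composite-key sort by a frequency-bucket traversal (distinct
-- frequencies descending, each bucket's values ascending); same cost class, alternative structure.
-- ===== PORT A =====
-- item[0] is ported as pyGetD item 0 0: Pre_ restricts to datasets whose rows are
-- non-empty, exactly where Python's item[0] returns (elsewhere A raises IndexError).
def sort_unique_values (dataset : List (List Int)) : List Int :=
  let frequency_dict : PySem.Dict Int Int :=
    dataset.foldl (fun d item =>
      let value := PySem.List.pyGetD item 0 0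
      if d.contains value then d.insert value (d.getD value 0 + 1)
      else d.insert value 1) PySem.Dict.empty
  let sorted_keys :=
    PySem.List.sorted2 frequency_dict.keys
      (fun k => -(frequency_dict.getD k 0)) (fun k => k) false
  sorted_keys.foldl (fun result key => result ++ [key]) []

-- ===== PORT B =====
def sort_unique_values_alt (dataset : List (List Int)) : List Int :=
  let counts : PySem.Dict Int Int :=
    dataset.foldl (fun d item => d.modify (PySem.List.pyGetD item 0 0) 0 (· + 1))
      PySem.Dict.empty
  (PySem.List.sorted (PySem.Set.ofList counts.values) (fun c => c) true).foldl
    (fun result c =>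
      result ++ PySem.List.sorted
        (counts.keys.filter (fun v => counts.getD v 0 == c)) (fun v => v) false) []

-- ===== PRECONDITION & SPEC =====
-- Pre_ excludes exactly the datasets containing an empty row, on which Python's item[0] raises IndexError (in A and in B alike).
def Pre_sort_unique_values (dataset : List (List Int)) : Prop := ∀ item ∈ dataset, item ≠ []
instance (dataset : List (List Int)) : Decidable (Pre_sort_unique_values dataset) := by unfold Pre_sort_unique_values; infer_instance
def pvWitness_sort_unique_values : List (List Int) := [[3], [1, 7], [3], [2], [1]]
def Spec_sort_unique_values (dataset : List (List Int)) (out : List Int) : Prop := out = sort_unique_values_alt dataset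
instance (dataset : List (List Int)) (out : List Int) : Decidable (Spec_sort_unique_values dataset out) := by unfold Spec_sort_unique_values; infer_instance

-- ===== CLAIM (what is proved, stated in full; the proofs are below) =====
def Claim_equal_sort_unique_values : Prop := ∀ (dataset : List (List Int)), Dom_sort_unique_values dataset → Pre_sort_unique_values dataset → Spec_sort_unique_values dataset (sort_unique_values dataset)

-- ===== LEMMAS AND PROOFS =====

-- composite two-key sort is the lex-key sort
theorem pv_sorted2_eq_sorted_lex (xs : List Int) (k1 k2 : Int → Int) :
    PySem.List.sorted2 xs k1 k2 false
      = PySem.List.sorted xs (fun x => (toLex (k1 x, k2 x) : Lex (Int × Int))) false := by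
  rw [PySem.List.sorted_eq_foldl_insertBy]
  unfold PySem.List.sorted2
  simp only []
  congr 1
  funext acc x
  congr 1
  funext a b
  rcases lt_trichotomy (k1 a) (k1 b) with h | h | h
  · simp [h, Prod.Lex.lt_iff]
  · simp [h, Prod.Lex.lt_iff]
  · simp [h, not_lt_of_gt h, Prod.Lex.lt_iff]
    omega

-- L1/L2: both counting loops build Counter(first elements)
theorem pv_countA (dataset : List (List Int)) :
    dataset.foldl (fun d item =>
      let value := PySem.List.pyGetD item 0 0
      if d.contains value then d.insert value (d.getD value 0 + 1)
      else d.insert value 1) PySem.Dict.empty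
    = PySem.Dict.counter (dataset.map (fun item => PySem.List.pyGetD item 0 0)) := by
  rw [← PySem.Dict.foldl_insert_getD_add_one_eq_counter, List.foldl_map]
  apply PySem.List.foldl_congr_mem
  intro d item _
  by_cases h : d.contains (PySem.List.pyGetD item 0 0)
  · simp [h]
  · simp only [Bool.not_eq_true] at h
    simp [h, PySem.Dict.getD_of_not_contains d 0 h]

theorem pv_countB (dataset : List (List Int)) :
    dataset.foldl (fun d item => d.modify (PySem.List.pyGetD item 0 0) 0 (· + 1)) PySem.Dict.empty
    = PySem.Dict.counter (dataset.map (fun item => PySem.List.pyGetD item 0 0)) := by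
  rw [PySem.Dict.counter_eq_foldl, List.foldl_map]

theorem pv_main (vs : List Int) :
    PySem.List.sorted (PySem.Set.ofList vs)
        (fun k => (toLex (-(vs.count k : Int), k) : Lex (Int × Int))) false
    = (PySem.List.sorted
        (PySem.Set.ofList ((PySem.Set.ofList vs).map (fun k => (vs.count k : Int))))
        (fun c => c) true).flatMap
        (fun c => PySem.List.sorted
          ((PySem.Set.ofList vs).filter (fun v => (vs.count v : Int) == c)) (fun v => v) false) := by
  set K := PySem.Set.ofList vs with hK
  set cnt : Int → Int := fun k => (vs.count k : Int) with hcnt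
  set cs := PySem.List.sorted (PySem.Set.ofList (K.map cnt)) (fun c => c) true with hcs
  set Sc : Int → List Int := fun c =>
    PySem.List.sorted (K.filter (fun v => cnt v == c)) (fun v => v) false with hSc
  have hKnd : K.Nodup := PySem.Set.nodup_ofList vs
  have hcs_perm : cs.Perm (PySem.Set.ofList (K.map cnt)) := PySem.List.sorted_perm _ _ _
  have hcs_nodup : cs.Nodup := hcs_perm.nodup_iff.mpr (PySem.Set.nodup_ofList _)
  have hcs_mem : ∀ c, c ∈ cs ↔ c ∈ K.map cnt := fun c =>
    hcs_perm.mem_iff.trans (PySem.Set.mem_ofList _ _)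
  have hcs_gt : List.Pairwise (fun a b => b < a) cs :=
    (hcs_nodup.and (PySem.List.sorted_pairwise_rev _ _)).imp
      (fun h => lt_of_le_of_ne h.2 (Ne.symm h.1))
  have hSc_mem : ∀ c x, x ∈ Sc c ↔ x ∈ K ∧ cnt x = c := by
    intro c x
    rw [hSc]
    rw [(PySem.List.sorted_perm _ _ _).mem_iff, List.mem_filter]
    simp
  have hSc_nodup : ∀ c, (Sc c).Nodup :=
    fun c => (PySem.List.sorted_perm _ _ _).nodup_iff.mpr (hKnd.filter _)
  have hSc_lt : ∀ c, List.Pairwise (fun a b => a < b) (Sc c) := by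
    intro c
    exact ((hSc_nodup c).and (PySem.List.sorted_pairwise _ _)).imp
      (fun h => lt_of_le_of_ne h.2 h.1)
  have hys_nodup : (cs.flatMap Sc).Nodup := by
    rw [List.flatMap_def, List.nodup_flatten]
    constructor
    · intro l hl
      obtain ⟨c, _, rfl⟩ := List.mem_map.mp hl
      exact hSc_nodup c
    · rw [List.pairwise_map]
      refine hcs_gt.imp ?_
      intro c d hdc x hxc hxd
      have h1 := ((hSc_mem c x).mp hxc).2
      have h2 := ((hSc_mem d x).mp hxd).2
      omega
  have hys_perm : (cs.flatMap Sc).Perm K := by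
    rw [List.perm_ext_iff_of_nodup hys_nodup hKnd]
    intro x
    rw [List.mem_flatMap]
    constructor
    · rintro ⟨c, _, hx⟩
      exact ((hSc_mem c x).mp hx).1
    · intro hx
      exact ⟨cnt x, (hcs_mem _).mpr (List.mem_map_of_mem hx), (hSc_mem _ x).mpr ⟨hx, rfl⟩⟩
  have hys_pair : List.Pairwise
      (fun a b => (toLex (-(cnt a), a) : Lex (Int × Int)) < toLex (-(cnt b), b))
      (cs.flatMap Sc) := by
    rw [List.flatMap_def, List.pairwise_flatten]
    constructor
    · intro l hl
      obtain ⟨c, _, rfl⟩ := List.mem_map.mp hl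
      refine (hSc_lt c).imp_of_mem ?_
      intro a b ha hb hab
      have h1 := ((hSc_mem c a).mp ha).2
      have h2 := ((hSc_mem c b).mp hb).2
      rw [Prod.Lex.lt_iff]
      right
      constructor
      · simp [h1, h2]
      · simpa using hab
    · rw [List.pairwise_map]
      refine hcs_gt.imp ?_
      intro c d hdc x hxc y hyd
      have h1 := ((hSc_mem c x).mp hxc).2
      have h2 := ((hSc_mem d y).mp hyd).2
      rw [Prod.Lex.lt_iff]
      left
      simp [h1, h2]
      omega
  show PySem.List.sorted K (fun k => (toLex (-(cnt k), k) : Lex (Int × Int))) false = cs.flatMap Sc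
  exact PySem.List.sorted_eq_of_perm_of_pairwise_lt _ _ _ hys_perm hys_pair


-- ===== VERDICT (by name: the statement is the Claim_ definition above) =====
theorem sort_unique_values_spec : Claim_equal_sort_unique_values := by
  intro dataset _ _
  unfold Spec_sort_unique_values
  simp only [sort_unique_values, sort_unique_values_alt]
  rw [pv_countA, pv_countB]
  rw [PySem.List.foldl_append_singleton_eq_self, List.nil_append]
  rw [pv_sorted2_eq_sorted_lex]
  rw [PySem.List.foldl_append_eq_flatMap, List.nil_append]
  rw [PySem.Dict.values_eq_map_keys _ (PySem.Dict.nodup_keys_counter _) 0]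
  simp only [PySem.Dict.keys_counter, PySem.Dict.getD_counter]
  exact pv_main _
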